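-- pv_equiv track=rewrite | github.com/Ibrohimbek77/Python3 | lesson-6/homework/hw-6.py | insert_underscores
-- ===== SOURCE A (Python) =====
-- def insert_underscores(txt):
--     vowels = "aeiouAEIOU"
--     result = []
--     char_count = 0  # count every character
--
--     i = 0
--     while i < len(txt):
--         ch = txt[i]
--         result.append(ch)
--         char_count += 1
--
--         # time to place underscore?
--         if char_count == 3:
--             place = i + 1  # try to place underscore after current char
--
--             # shift forward while:
--             # 1) the character is a vowel
--             # 2) or the NEXT character already has an underscore
--             while True:
--                 # cannot place at the very end
--                 if place >= len(txt):
--                     break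
--
--                 # check vowel at placement point
--                 if txt[place] in vowels:
--                     place += 1
--                     continue
--
--                 # check if already underscore after placement
--                 if place < len(txt) and txt[place] == '_':
--                     place += 1
--                     continue
--
--                 break
--
--             # insert underscore if valid
--             if place < len(txt):
--                 result.append("_")
--
--             char_count = 0  # restart counting
--
--         i += 1
--
--     # remove trailing underscore if it was added
--     if result and result[-1] == "_":
--         result.pop()
--
--     return "".join(result)
-- ===== SOURCE B (Python) =====
-- def insert_underscores(txt):
--     vowels = set("aeiouAEIOU")
--     n = len(txt)
--     # suffix table: has_placeable[p] == True iff some j >= p has txt[j] not a vowel and not '_'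
--     has_placeable = [False] * (n + 1)
--     for p in range(n - 1, -1, -1):
--         has_placeable[p] = has_placeable[p + 1] or (txt[p] not in vowels and txt[p] != '_')
--     out = []
--     for i, ch in enumerate(txt):
--         out.append(ch)
--         if (i + 1) % 3 == 0 and has_placeable[i + 1]:
--             out.append('_')
--     if out and out[-1] == '_':
--         out.pop()
--     return ''.join(out)
-- ===== Notes on version B (the rewrite author's own statement) =====
-- stated objective: faster
-- what changed: B precomputes in one right-to-left pass a suffix boolean table marking whether a placeable character (neither vowel nor underscore) occurs at or after each position, so a single left-to-right pass decides each underscore placement by one table lookup instead of A's repeated inner forward scan; intended as asymptotically faster (A is quadratic on vowel/underscore-heavy text, where the probe measured A timing out while B kept returning), measured about 1.7x on random text.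
import Mathlib
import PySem

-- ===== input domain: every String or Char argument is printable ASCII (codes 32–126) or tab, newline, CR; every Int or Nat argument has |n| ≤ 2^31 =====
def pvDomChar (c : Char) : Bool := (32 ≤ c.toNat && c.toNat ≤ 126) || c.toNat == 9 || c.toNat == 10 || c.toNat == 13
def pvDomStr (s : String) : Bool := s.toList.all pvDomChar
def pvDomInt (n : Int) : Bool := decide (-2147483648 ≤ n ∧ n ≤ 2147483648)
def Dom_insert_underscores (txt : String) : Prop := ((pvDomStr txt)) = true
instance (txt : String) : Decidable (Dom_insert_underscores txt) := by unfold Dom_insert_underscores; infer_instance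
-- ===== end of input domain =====

-- B precomputes a suffix 'placeable character exists' table in one right-to-left pass,
-- replacing A's repeated inner forward scan; one left-to-right pass then emits the output.

-- ===== PORT A =====
def pvVowelsA : List Char := "aeiouAEIOU".toList

-- A's inner 'while True' scan: skip vowels and underscores, stop at a placeable char or the end
def pvFindPlace (l : List Char) (place : Nat) : Nat :=
  if h : place < l.length then
    if pvVowelsA.contains l[place] then pvFindPlace l (place + 1)
    else if l[place] == '_' then pvFindPlace l (place + 1)
    else place
  else place
termination_by l.length - place

-- A's outer 'while i < len(txt)' loop with state (i, char_count, result)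
def pvLoopA (l : List Char) (i cc : Nat) (res : List Char) : List Char :=
  if h : i < l.length then
    let res1 := res ++ [l[i]]
    let cc1 := cc + 1
    if cc1 == 3 then
      let place := pvFindPlace l (i + 1)
      let res2 := if place < l.length then res1 ++ ['_'] else res1
      pvLoopA l (i + 1) 0 res2
    else
      pvLoopA l (i + 1) cc1 res1
  else res
termination_by l.length - i

def insert_underscores (txt : String) : String :=
  let l := txt.toList
  let res := pvLoopA l 0 0 []
  -- 'if result and result[-1] == "_": result.pop()' (getLast? = none on the empty list)
  let res2 := if res.getLast? == some '_' then res.dropLast else res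
  String.ofList res2

-- ===== PORT B =====
def pvVowelSetB : PySem.Set Char := PySem.Set.ofList "aeiouAEIOU".toList

def pvPlaceable (c : Char) : Bool := !(PySem.Set.contains pvVowelSetB c) && c != '_'

-- the right-to-left fill of has_placeable: entry p of the result is has_placeable[p] (length n+1)
def pvTableB : List Char → List Bool
  | [] => [false]
  | c :: rest =>
    let t := pvTableB rest
    (t.headD false || pvPlaceable c) :: t

-- body of B's 'for i, ch in enumerate(txt)' loop (PySem.Int.mod is Python's %)
def pvStepB (T : List Bool) (out : List Char) (p : Int × Char) : List Char :=
  let out1 := out ++ [p.2]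
  if PySem.Int.mod (p.1 + 1) 3 == 0 && PySem.List.pyGetD T (p.1 + 1) false then out1 ++ ['_']
  else out1

def insert_underscores_alt (txt : String) : String :=
  let l := txt.toList
  let T := pvTableB l
  let out := (PySem.List.enumerate l 0).foldl (pvStepB T) []
  -- 'if out and out[-1] == "_": out.pop()'
  let out2 := if out.getLast? == some '_' then out.dropLast else out
  String.ofList out2

-- ===== PRECONDITION & SPEC =====
def Spec_insert_underscores (txt : String) (out : String) : Prop := out = insert_underscores_alt txt
instance (txt : String) (out : String) : Decidable (Spec_insert_underscores txt out) := by unfold Spec_insert_underscores; infer_instance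

-- ===== CLAIM (what is proved, stated in full; the proofs are below) =====
def Claim_equal_insert_underscores : Prop := ∀ (txt : String), Dom_insert_underscores txt → Spec_insert_underscores txt (insert_underscores txt)

-- ===== LEMMAS AND PROOFS =====

-- both sides test the same 'not a vowel and not underscore' predicate
theorem pvPlaceable_eq (c : Char) :
    pvPlaceable c = (!pvVowelsA.contains c && c != '_') := by
  have h : pvVowelSetB = pvVowelsA := by decide
  simp [pvPlaceable, PySem.Set.contains, h]

-- head of the table = 'some placeable char in the whole suffix'
theorem pvTableB_headD (l : List Char) :
    (pvTableB l).headD false = l.any pvPlaceable := by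
  induction l with
  | nil => simp [pvTableB]
  | cons c rest ih =>
    have h : pvTableB (c :: rest)
        = ((pvTableB rest).headD false || pvPlaceable c) :: pvTableB rest := rfl
    rw [h, List.headD_cons, ih, List.any_cons, Bool.or_comm]

theorem pvTableB_getD (l : List Char) (p : Nat) :
    (pvTableB l).getD p false = (l.drop p).any pvPlaceable := by
  induction l generalizing p with
  | nil => cases p <;> simp [pvTableB]
  | cons c rest ih =>
    have h : pvTableB (c :: rest)
        = ((pvTableB rest).headD false || pvPlaceable c) :: pvTableB rest := rfl
    cases p with
    | zero =>
      rw [h, List.getD_cons_zero, pvTableB_headD, List.drop_zero, List.any_cons,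
        Bool.or_comm]
    | succ p => rw [h, List.getD_cons_succ, ih, List.drop_succ_cons]

theorem pvFindPlace_lt (l : List Char) (p : Nat) :
    (pvFindPlace l p < l.length) ↔ (l.drop p).any pvPlaceable = true := by
  fun_induction pvFindPlace l p with
  | case1 p h hv ih =>
    have hd : (l.drop p).any pvPlaceable
        = (pvPlaceable l[p] || (l.drop (p + 1)).any pvPlaceable) := by
      rw [List.drop_eq_getElem_cons h, List.any_cons]
    have hpl : pvPlaceable l[p] = false := by
      have hv' : l[p] ∈ pvVowelsA := by simpa using hv
      rw [pvPlaceable_eq]; simp [hv']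
    rw [ih, hd, hpl, Bool.false_or]
  | case2 p h hv hu ih =>
    have hd : (l.drop p).any pvPlaceable
        = (pvPlaceable l[p] || (l.drop (p + 1)).any pvPlaceable) := by
      rw [List.drop_eq_getElem_cons h, List.any_cons]
    have hpl : pvPlaceable l[p] = false := by
      have hu' : l[p] = '_' := by simpa using hu
      rw [pvPlaceable_eq]; simp [hu']
    rw [ih, hd, hpl, Bool.false_or]
  | case3 p h hv hu =>
    have hd : (l.drop p).any pvPlaceable
        = (pvPlaceable l[p] || (l.drop (p + 1)).any pvPlaceable) := by
      rw [List.drop_eq_getElem_cons h, List.any_cons]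
    have hpl : pvPlaceable l[p] = true := by
      have hv' : l[p] ∉ pvVowelsA := by simpa using hv
      have hu' : ¬ l[p] = '_' := by simpa using hu
      rw [pvPlaceable_eq]; simp [hv', hu']
    rw [hd, hpl, Bool.true_or]
    simp [h]
  | case4 p h =>
    rw [List.drop_eq_nil_of_le (by omega)]
    simp [h]

-- common description of the emitted character list, from position i on
def pvSpec (l : List Char) (i : Nat) : List Char :=
  if h : i < l.length then
    l[i] :: (if (i + 1) % 3 == 0 && (l.drop (i + 1)).any pvPlaceable then
               '_' :: pvSpec l (i + 1) else pvSpec l (i + 1))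
  else []
termination_by l.length - i

theorem pvLoopA_spec (l : List Char) (n i : Nat) (res : List Char)
    (hn : l.length - i ≤ n) : pvLoopA l i (i % 3) res = res ++ pvSpec l i := by
  induction n generalizing i res with
  | zero =>
    have h : ¬ i < l.length := by omega
    rw [pvLoopA, dif_neg h, pvSpec, dif_neg h, List.append_nil]
  | succ n ih =>
    by_cases h : i < l.length
    · rw [pvLoopA, dif_pos h, pvSpec, dif_pos h]
      by_cases h3 : i % 3 + 1 = 3
      · have hc : (i % 3 + 1 == 3) = true := by simp [h3]
        have hm : ((i + 1) % 3 == 0) = true := by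
          simp only [beq_iff_eq]; omega
        simp only [hc, if_pos]
        have hz : (0 : Nat) = (i + 1) % 3 := by omega
        by_cases hp : pvFindPlace l (i + 1) < l.length
        · have hany : (l.drop (i + 1)).any pvPlaceable = true :=
            (pvFindPlace_lt l (i + 1)).mp hp
          rw [if_pos hp, hz, ih (i + 1) _ (by omega)]
          simp [hany]
        · have hany : ¬ (l.drop (i + 1)).any pvPlaceable = true :=
            fun h' => hp ((pvFindPlace_lt l (i + 1)).mpr h')
          simp only [Bool.not_eq_true] at hany
          rw [if_neg hp, hz, ih (i + 1) _ (by omega)]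
          simp [hany]
      · have hc : (i % 3 + 1 == 3) = false := by simpa using h3
        have hm : ((i + 1) % 3 == 0) = false := by
          simp only [beq_eq_false_iff_ne, ne_eq]; omega
        have hcc : i % 3 + 1 = (i + 1) % 3 := by omega
        simp only [hc, if_neg, Bool.false_eq_true, not_false_iff]
        rw [hcc, ih (i + 1) _ (by omega)]
        simp [hm]
    · rw [pvLoopA, dif_neg h, pvSpec, dif_neg h, List.append_nil]

theorem pvInt_mod_cond (k : Nat) :
    (PySem.Int.mod (k : Int) 3 == 0) = (k % 3 == 0) := by
  rw [PySem.Int.mod_eq_emod_of_pos (by norm_num)]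
  have h2 : ((k : Int)) % 3 = ((k % 3 : Nat) : Int) := by push_cast; omega
  rw [h2]
  by_cases hk : k % 3 = 0
  · simp [hk]
  · simp [hk]
    omega

theorem pvFoldB_spec (l : List Char) (n k : Nat) (out : List Char)
    (hn : l.length - k ≤ n) :
    (PySem.List.enumerate (l.drop k) (k : Int)).foldl (pvStepB (pvTableB l)) out
      = out ++ pvSpec l k := by
  induction n generalizing k out with
  | zero =>
    have h : ¬ k < l.length := by omega
    rw [List.drop_eq_nil_of_le (by omega), pvSpec, dif_neg h]
    simp [PySem.List.enumerate]
  | succ n ih =>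
    by_cases h : k < l.length
    · rw [List.drop_eq_getElem_cons h, PySem.List.enumerate_cons, List.foldl_cons,
        pvSpec, dif_pos h]
      have hk1 : (k : Int) + 1 = ((k + 1 : Nat) : Int) := by push_cast; ring
      have hstep : pvStepB (pvTableB l) out ((k : Int), l[k])
          = out ++ l[k] :: (if (k + 1) % 3 == 0 && (l.drop (k + 1)).any pvPlaceable
                            then ['_'] else []) := by
        simp only [pvStepB, hk1, pvInt_mod_cond, PySem.List.pyGetD_natCast, pvTableB_getD]
        cases hcc : ((k + 1) % 3 == 0 && (l.drop (k + 1)).any pvPlaceable) <;> simp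
      rw [hstep, hk1, ih (k + 1) _ (by omega)]
      cases hcc : ((k + 1) % 3 == 0 && (l.drop (k + 1)).any pvPlaceable) <;> simp
    · rw [List.drop_eq_nil_of_le (by omega), pvSpec, dif_neg h]
      simp [PySem.List.enumerate]

-- ===== VERDICT (by name: the statement is the Claim_ definition above) =====
theorem insert_underscores_spec : Claim_equal_insert_underscores := by
  intro txt _
  unfold Spec_insert_underscores insert_underscores insert_underscores_alt
  have hA := pvLoopA_spec txt.toList txt.toList.length 0 [] (by omega)
  have hB := pvFoldB_spec txt.toList txt.toList.length 0 [] (by omega)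
  simp only [Nat.zero_mod] at hA
  simp only [List.drop_zero, Nat.cast_zero] at hB
  simp [hA, hB]
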